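-- pv_equiv track=rewrite | github.com/rajlath/rkl_codes | HackerEarth/divisible_trio.py | find_trios
-- ===== SOURCE A (Python) =====
-- def find_trios(arr, M):
--     arr = sorted(arr)
--     lens= len(arr)
--     cnt = 0
--     for i in range(lens-2):
--         for j in range(i+1, lens-1):
--             for k in range(j+1, lens):
--                 if (arr[i]+arr[j]+arr[k])%M==0:
--                     cnt += 1
--     return cnt
-- ===== SOURCE B (Python) =====
-- def find_trios(arr, M):
--     if len(arr) < 3:
--         return 0
--     total = 0
--     seen = {}
--     for j, x in enumerate(arr):
--         for y in arr[j + 1:]: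
--             total += seen.get((-(x + y)) % M, 0)
--         r = x % M
--         seen[r] = seen.get(r, 0) + 1
--     return total
-- ===== Notes on version B (the rewrite author's own statement) =====
-- stated objective: faster
-- what changed: B replaces A's O(n^3) triple nested index loop (after a pointless sort) with a single left-to-right pass that keeps a dict of residue counts of the elements already seen: for each middle element x it scans only the later elements y and adds the count of earlier elements whose residue completes (x+y) to a multiple of M, turning the cubic scan into a quadratic one.
import Mathlib
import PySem

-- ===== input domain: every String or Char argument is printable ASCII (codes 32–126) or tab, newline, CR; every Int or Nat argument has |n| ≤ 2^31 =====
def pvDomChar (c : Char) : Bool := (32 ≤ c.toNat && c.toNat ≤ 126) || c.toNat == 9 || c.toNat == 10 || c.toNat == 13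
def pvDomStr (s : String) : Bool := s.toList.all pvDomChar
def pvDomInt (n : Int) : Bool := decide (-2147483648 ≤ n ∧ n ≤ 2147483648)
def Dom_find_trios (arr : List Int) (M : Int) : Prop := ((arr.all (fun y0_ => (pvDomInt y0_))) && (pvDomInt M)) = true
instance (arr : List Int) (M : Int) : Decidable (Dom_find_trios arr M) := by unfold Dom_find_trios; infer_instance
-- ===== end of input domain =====

-- B replaces A's O(n^3) triple index loop (after a sort that cannot change the count) with one
-- left-to-right pass keeping a dict of residue counts of the already-seen elements (O(n^2)).

-- ===== PORT A =====
def find_trios (arr : List Int) (M : Int) : Int :=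
  let arr := PySem.List.sorted arr (fun x => x) false
  let lens : Int := arr.length
  let cnt : Int := 0
  let cnt := (PySem.List.pyRange 0 (lens - 2) 1).foldl (fun cnt i =>
    (PySem.List.pyRange (i + 1) (lens - 1) 1).foldl (fun cnt j =>
      (PySem.List.pyRange (j + 1) lens 1).foldl (fun cnt k =>
        if PySem.Int.mod (PySem.List.pyGetD arr i 0 + PySem.List.pyGetD arr j 0 +
            PySem.List.pyGetD arr k 0) M == 0 then cnt + 1 else cnt) cnt) cnt) cnt
  cnt

-- ===== PORT B =====
def find_trios_alt (arr : List Int) (M : Int) : Int :=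
  if arr.length < 3 then 0 else
  let st := (PySem.List.enumerate arr).foldl
    (fun (st : Int × PySem.Dict Int Int) jx =>
      let total := (PySem.List.slice arr (some (jx.1 + 1)) none).foldl
        (fun t y => t + st.2.getD (PySem.Int.mod (-(jx.2 + y)) M) 0) st.1
      let r := PySem.Int.mod jx.2 M
      (total, st.2.insert r (st.2.getD r 0 + 1)))
    (0, PySem.Dict.empty)
  st.1

-- ===== PRECONDITION & SPEC =====
-- Pre_ excludes exactly the inputs where the Python raises ZeroDivisionError: M = 0 with at least 3 elements.
def Pre_find_trios (arr : List Int) (M : Int) : Prop := M ≠ 0 ∨ arr.length < 3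
instance (arr : List Int) (M : Int) : Decidable (Pre_find_trios arr M) := by unfold Pre_find_trios; infer_instance
def pvWitness_find_trios : List Int × Int := ([1, 2, 3, 4], 3)

def Spec_find_trios (arr : List Int) (M : Int) (out : Int) : Prop := out = find_trios_alt arr M
instance (arr : List Int) (M : Int) (out : Int) : Decidable (Spec_find_trios arr M out) := by unfold Spec_find_trios; infer_instance

-- ===== CLAIM (what is proved, stated in full; the proofs are below) =====
def Claim_equal_find_trios : Prop := ∀ (arr : List Int) (M : Int), Dom_find_trios arr M → Pre_find_trios arr M → Spec_find_trios arr M (find_trios arr M)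

-- ===== LEMMAS AND PROOFS =====

-- the common combinatorial spec: the number of index triples i<j<k with (a_i+a_j+a_k) % M == 0,
-- decomposed by the FIRST element of the triple
def pvP (M s : Int) : Bool := PySem.Int.mod s M == 0
def pvC1 (M s : Int) (l : List Int) : Nat := l.countP (fun y => pvP M (s + y))
def pvC2 (M s : Int) : List Int → Nat
  | [] => 0
  | b :: t => pvC1 M (s + b) t + pvC2 M s t
def pvC3 (M : Int) : List Int → Nat
  | [] => 0
  | a :: t => pvC2 M a t + pvC3 M t

-- residue count of a prefix (what B's dict holds)
def pvR (M : Int) (p : List Int) (r : Int) : Nat := p.countP (fun y => PySem.Int.mod y M == r)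
-- triples whose middle element x is fixed, first element in prefix p, last element in t
def pvC2' (M x : Int) (p t : List Int) : Nat := (t.map (fun y => pvC1 M (x + y) p)).sum
-- triples whose middle element lies in l and whose first element lies in p ++ l
def pvX (M : Int) (p : List Int) : List Int → Nat
  | [] => 0
  | x :: t => pvC2' M x p t + pvX M (p ++ [x]) t
def pvC2s (M : Int) (t : List Int) : List Int → Nat
  | [] => 0
  | a :: p => pvC2 M a t + pvC2s M t p
def pvS (M x : Int) (p t : List Int) : Nat := (p.map (fun a => pvC1 M (a + x) t)).sum

-- ----- generic sum helpers -----
lemma pv_sum_map_add (p : List Int) (u v : Int → Nat) :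
    (p.map (fun a => u a + v a)).sum = (p.map u).sum + (p.map v).sum := by
  induction p with
  | nil => rfl
  | cons a p ih => simp [List.map_cons, ih]; omega

lemma pv_sum_map_ite (p : List Int) (q : Int → Bool) :
    (p.map (fun a => if q a then 1 else 0)).sum = p.countP q := by
  induction p with
  | nil => rfl
  | cons a p ih => simp [List.map_cons, List.countP_cons, ih]; omega

-- ----- residue arithmetic: z ≡ -s  (mod M)  iff  s + z ≡ 0  (mod M) -----
lemma pv_residue_iff (M s z : Int) :
    (PySem.Int.mod z M == PySem.Int.mod (-s) M) = (PySem.Int.mod (s + z) M == 0) := by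
  have h1 := PySem.Int.floordiv_mul_add_mod z M
  have h2 := PySem.Int.floordiv_mul_add_mod (-s) M
  have hdvd := PySem.Int.mod_eq_zero_iff_dvd (s + z) M
  rw [Bool.eq_iff_iff]; simp only [beq_iff_eq]
  rcases lt_trichotomy M 0 with hM | hM | hM
  · have b1 := PySem.Int.mod_neg_bounds z hM
    have b2 := PySem.Int.mod_neg_bounds (-s) hM
    constructor
    · intro h
      rw [hdvd]
      exact ⟨PySem.Int.floordiv z M - PySem.Int.floordiv (-s) M, by linarith [h]⟩
    · intro h
      obtain ⟨k, hk⟩ := hdvd.mp h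
      have hdv : M ∣ (PySem.Int.mod z M - PySem.Int.mod (-s) M) :=
        ⟨k - PySem.Int.floordiv z M + PySem.Int.floordiv (-s) M, by linarith⟩
      have habs : |PySem.Int.mod z M - PySem.Int.mod (-s) M| < |M| := by
        rw [abs_lt, abs_of_neg hM]; constructor <;> linarith [b1.1, b1.2, b2.1, b2.2]
      have := Int.eq_zero_of_abs_lt_dvd ((abs_dvd M _).mpr hdv) habs
      linarith
  · subst hM
    have e1 : PySem.Int.mod z 0 = z := by
      have := PySem.Int.floordiv_mul_add_mod z 0; omega
    have e2 : PySem.Int.mod (-s) 0 = -s := by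
      have := PySem.Int.floordiv_mul_add_mod (-s) 0; omega
    have e3 : PySem.Int.mod (s + z) 0 = s + z := by
      have := PySem.Int.floordiv_mul_add_mod (s + z) 0; omega
    rw [e1, e2, e3]; omega
  · have b1l := PySem.Int.mod_nonneg z hM
    have b1r := PySem.Int.mod_lt z hM
    have b2l := PySem.Int.mod_nonneg (-s) hM
    have b2r := PySem.Int.mod_lt (-s) hM
    constructor
    · intro h
      rw [hdvd]
      exact ⟨PySem.Int.floordiv z M - PySem.Int.floordiv (-s) M, by linarith [h]⟩
    · intro h
      obtain ⟨k, hk⟩ := hdvd.mp h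
      have hdv : M ∣ (PySem.Int.mod z M - PySem.Int.mod (-s) M) :=
        ⟨k - PySem.Int.floordiv z M + PySem.Int.floordiv (-s) M, by linarith⟩
      have habs : |PySem.Int.mod z M - PySem.Int.mod (-s) M| < |M| := by
        rw [abs_lt, abs_of_pos hM]; constructor <;> linarith
      have := Int.eq_zero_of_abs_lt_dvd ((abs_dvd M _).mpr hdv) habs
      linarith

-- ----- permutation invariance of the spec -----
lemma pvC2_perm (M s : Int) {l1 l2 : List Int} (h : l1.Perm l2) : pvC2 M s l1 = pvC2 M s l2 := by
  induction h with
  | nil => rfl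
  | cons x h ih => simp [pvC2, pvC1, List.Perm.countP_eq _ h, ih]
  | swap x y l =>
    have e : s + y + x = s + x + y := by ring
    simp [pvC2, pvC1, List.countP_cons, e]
    omega
  | trans h1 h2 ih1 ih2 => exact ih1.trans ih2

lemma pvC3_perm (M : Int) {l1 l2 : List Int} (h : l1.Perm l2) : pvC3 M l1 = pvC3 M l2 := by
  induction h with
  | nil => rfl
  | cons x h ih => simp [pvC3, pvC2_perm M x h, ih]
  | swap x y l =>
    have e : y + x = x + y := by ring
    simp [pvC3, pvC2, pvC1, e]
    omega
  | trans h1 h2 ih1 ih2 => exact ih1.trans ih2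

-- ----- degenerate cases -----
lemma pvC2_short (M s : Int) (l : List Int) (h : l.length ≤ 1) : pvC2 M s l = 0 := by
  match l, h with
  | [], _ => rfl
  | [b], _ => simp [pvC2, pvC1]

lemma pvC3_short (M : Int) (l : List Int) (h : l.length ≤ 2) : pvC3 M l = 0 := by
  match l, h with
  | [], _ => rfl
  | [a], _ => simp [pvC3, pvC2]
  | [a, b], _ => simp [pvC3, pvC2, pvC1]

-- ----- A's loops compute pvC3 of the sorted list -----
lemma pvA_inner (M : Int) (L : List Int) (s : Int) :
    ∀ (d : Nat) (t c : Int), 0 ≤ t → (L.length : Int) - t ≤ d →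
    (PySem.List.pyRange t (L.length : Int) 1).foldl
      (fun cnt k => if PySem.Int.mod (s + PySem.List.pyGetD L k 0) M == 0 then cnt + 1 else cnt) c
    = c + (pvC1 M s (L.drop t.toNat) : Int) := by
  intro d
  induction d with
  | zero =>
    intro t c h0 hb
    rw [PySem.List.pyRange_one_eq_nil (by omega), List.drop_eq_nil_of_le (by omega)]
    simp [pvC1]
  | succ d ih =>
    intro t c h0 hb
    by_cases ht : t < (L.length : Int)
    · rw [PySem.List.pyRange_one_cons ht, List.foldl_cons]
      have hlt : t.toNat < L.length := by omega
      have hget : PySem.List.pyGetD L t 0 = L[t.toNat] := PySem.List.pyGetD_eq_getElem L 0 h0 (by omega)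
      rw [ih (t + 1) _ (by omega) (by omega)]
      rw [List.drop_eq_getElem_cons hlt]
      have htn : (t + 1).toNat = t.toNat + 1 := by omega
      rw [htn] at *
      simp only [pvC1, List.countP_cons, hget, pvP]
      by_cases hp : (PySem.Int.mod (s + L[t.toNat]) M == 0) = true
      · simp [hp]; ring
      · simp [hp]
    · rw [PySem.List.pyRange_one_eq_nil (by omega), List.drop_eq_nil_of_le (by omega)]
      simp [pvC1]

lemma pvA_mid (M : Int) (L : List Int) (a : Int) :
    ∀ (d : Nat) (t c : Int), 0 ≤ t → (L.length : Int) - 1 - t ≤ d →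
    (PySem.List.pyRange t ((L.length : Int) - 1) 1).foldl
      (fun cnt j =>
        (PySem.List.pyRange (j + 1) (L.length : Int) 1).foldl
          (fun cnt k => if PySem.Int.mod (a + PySem.List.pyGetD L j 0 + PySem.List.pyGetD L k 0) M == 0
            then cnt + 1 else cnt) cnt) c
    = c + (pvC2 M a (L.drop t.toNat) : Int) := by
  intro d
  induction d with
  | zero =>
    intro t c h0 hb
    rw [PySem.List.pyRange_one_eq_nil (by omega), pvC2_short M a _ (by simp [List.length_drop]; omega)]
    simp
  | succ d ih =>
    intro t c h0 hb
    by_cases ht : t < (L.length : Int) - 1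
    · rw [PySem.List.pyRange_one_cons ht, List.foldl_cons]
      have hlt : t.toNat < L.length := by omega
      have hget : PySem.List.pyGetD L t 0 = L[t.toNat] := PySem.List.pyGetD_eq_getElem L 0 h0 (by omega)
      rw [pvA_inner M L (a + PySem.List.pyGetD L t 0) L.length (t + 1) c (by omega) (by omega)]
      rw [ih (t + 1) _ (by omega) (by omega)]
      rw [List.drop_eq_getElem_cons hlt]
      have htn : (t + 1).toNat = t.toNat + 1 := by omega
      rw [htn]
      simp only [pvC2, hget]
      push_cast; ring
    · rw [PySem.List.pyRange_one_eq_nil (by omega), pvC2_short M a _ (by simp [List.length_drop]; omega)]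
      simp

lemma pvA_outer (M : Int) (L : List Int) :
    ∀ (d : Nat) (t c : Int), 0 ≤ t → (L.length : Int) - 2 - t ≤ d →
    (PySem.List.pyRange t ((L.length : Int) - 2) 1).foldl
      (fun cnt i =>
        (PySem.List.pyRange (i + 1) ((L.length : Int) - 1) 1).foldl
          (fun cnt j =>
            (PySem.List.pyRange (j + 1) (L.length : Int) 1).foldl
              (fun cnt k => if PySem.Int.mod (PySem.List.pyGetD L i 0 + PySem.List.pyGetD L j 0 +
                  PySem.List.pyGetD L k 0) M == 0 then cnt + 1 else cnt) cnt) cnt) c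
    = c + (pvC3 M (L.drop t.toNat) : Int) := by
  intro d
  induction d with
  | zero =>
    intro t c h0 hb
    rw [PySem.List.pyRange_one_eq_nil (by omega), pvC3_short M _ (by simp [List.length_drop]; omega)]
    simp
  | succ d ih =>
    intro t c h0 hb
    by_cases ht : t < (L.length : Int) - 2
    · rw [PySem.List.pyRange_one_cons ht, List.foldl_cons]
      have hlt : t.toNat < L.length := by omega
      have hget : PySem.List.pyGetD L t 0 = L[t.toNat] := PySem.List.pyGetD_eq_getElem L 0 h0 (by omega)
      rw [pvA_mid M L (PySem.List.pyGetD L t 0) L.length (t + 1) c (by omega) (by omega)]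
      rw [ih (t + 1) _ (by omega) (by omega)]
      rw [List.drop_eq_getElem_cons hlt]
      have htn : (t + 1).toNat = t.toNat + 1 := by omega
      rw [htn]
      simp only [pvC3, hget]
      push_cast; ring
    · rw [PySem.List.pyRange_one_eq_nil (by omega), pvC3_short M _ (by simp [List.length_drop]; omega)]
      simp

lemma pvA_eq (arr : List Int) (M : Int) :
    find_trios arr M = (pvC3 M (PySem.List.sorted arr (fun x => x) false) : Int) := by
  show (PySem.List.pyRange 0 ((((PySem.List.sorted arr (fun x => x) false).length : Int)) - 2) 1).foldl _ 0 = _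
  have h := pvA_outer M (PySem.List.sorted arr (fun x => x) false)
      (PySem.List.sorted arr (fun x => x) false).length 0 0 le_rfl (by omega)
  simpa using h

-- ----- counting by the middle element equals counting by the first element -----
lemma pvC2s_append (M : Int) (t p : List Int) (x : Int) :
    pvC2s M t (p ++ [x]) = pvC2s M t p + pvC2 M x t := by
  induction p with
  | nil => simp [pvC2s]
  | cons a p ih => simp [pvC2s, ih]; omega

lemma pvC2s_cons (M x : Int) (p t : List Int) :
    pvC2s M (x :: t) p = pvS M x p t + pvC2s M t p := by
  induction p with
  | nil => rfl
  | cons a p ih => simp [pvC2s, pvC2, ih, pvS, List.map_cons]; omega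

lemma pvSwap (M x : Int) : ∀ (t p : List Int), pvC2' M x p t = pvS M x p t := by
  intro t
  induction t with
  | nil =>
    intro p
    simp [pvC2', pvS, pvC1]
  | cons y t ih =>
    intro p
    have hf : (fun a => pvC1 M (a + x) (y :: t))
        = fun a => pvC1 M (a + x) t + (if pvP M (a + x + y) then 1 else 0) := by
      funext a; simp [pvC1, List.countP_cons]
    have h2 : pvS M x p (y :: t)
        = pvS M x p t + p.countP (fun a => pvP M (a + x + y)) := by
      rw [pvS, hf, pv_sum_map_add, pv_sum_map_ite]; rfl
    have h1 : pvC1 M (x + y) p = p.countP (fun a => pvP M (a + x + y)) := by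
      unfold pvC1
      apply List.countP_congr
      intro z _
      have e : x + y + z = z + x + y := by ring
      rw [e]
    have h0 : pvC2' M x p (y :: t) = pvC1 M (x + y) p + pvC2' M x p t := by
      simp [pvC2', List.map_cons]
    rw [h0, h2, ih p, h1]
    omega

lemma pvC2s_nil (M : Int) : ∀ p : List Int, pvC2s M [] p = 0
  | [] => rfl
  | a :: p => by
    show pvC2 M a [] + pvC2s M [] p = 0
    rw [pvC2s_nil M p]
    rfl

lemma pvX_eq (M : Int) : ∀ (t p : List Int), pvX M p t = pvC2s M t p + pvC3 M t := by
  intro t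
  induction t with
  | nil =>
    intro p
    rw [pvC2s_nil M p]
    rfl
  | cons x t ih =>
    intro p
    simp only [pvX, pvC3, ih, pvC2s_append, pvC2s_cons, pvSwap]
    omega

-- ----- B's fold maintains the residue dict and accumulates pvX -----
lemma pvB_main (arr : List Int) (M : Int) :
    ∀ (l p : List Int) (tot : Int) (d : PySem.Dict Int Int), arr = p ++ l →
    (∀ r, d.getD r 0 = (pvR M p r : Int)) →
    ((PySem.List.enumerate l (p.length : Int)).foldl
      (fun (st : Int × PySem.Dict Int Int) jx =>
        let total := (PySem.List.slice arr (some (jx.1 + 1)) none).foldl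
          (fun t y => t + st.2.getD (PySem.Int.mod (-(jx.2 + y)) M) 0) st.1
        let r := PySem.Int.mod jx.2 M
        (total, st.2.insert r (st.2.getD r 0 + 1))) (tot, d)).1
    = tot + (pvX M p l : Int) := by
  intro l
  induction l with
  | nil =>
    intro p tot d harr hd
    simp [PySem.List.enumerate, pvX]
  | cons x t ih =>
    intro p tot d harr hd
    rw [PySem.List.enumerate_cons, List.foldl_cons]
    have hslice : PySem.List.slice arr (some ((p.length : Int) + 1)) none = t := by
      have hc : ((p.length : Int) + 1) = ((p.length + 1 : Nat) : Int) := by push_cast; ring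
      rw [hc, PySem.List.slice_from_natCast, harr]
      have : p ++ x :: t = (p ++ [x]) ++ t := by simp
      rw [this]
      exact List.drop_left' (by simp)
    have hmap : ∀ y : Int, d.getD (PySem.Int.mod (-(x + y)) M) 0 = (pvC1 M (x + y) p : Int) := by
      intro y
      rw [hd]
      congr 1
      unfold pvR pvC1
      apply List.countP_congr
      intro z _
      rw [pv_residue_iff M (x + y) z]
      rfl
    have hinner :
        t.foldl (fun tt y => tt + d.getD (PySem.Int.mod (-(x + y)) M) 0) tot
          = tot + (pvC2' M x p t : Int) := by
      rw [PySem.List.foldl_add t (fun y => d.getD (PySem.Int.mod (-(x + y)) M) 0) tot]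
      congr 1
      have : t.map (fun y => d.getD (PySem.Int.mod (-(x + y)) M) 0)
          = t.map (fun y => ((pvC1 M (x + y) p : Nat) : Int)) := by
        apply List.map_congr_left
        intro y _
        exact hmap y
      rw [this, pvC2', Nat.cast_list_sum, List.map_map]
      rfl
    have hd' : ∀ r, (d.insert (PySem.Int.mod x M) (d.getD (PySem.Int.mod x M) 0 + 1)).getD r 0
        = (pvR M (p ++ [x]) r : Int) := by
      intro r
      rw [PySem.Dict.getD_insert]
      unfold pvR
      rw [List.countP_append]
      by_cases h : r = PySem.Int.mod x M
      · subst h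
        rw [if_pos rfl, hd]
        simp [pvR]
      · rw [if_neg h, hd]
        have : List.countP (fun y => PySem.Int.mod y M == r) [x] = 0 := by
          simp [List.countP_cons]
          intro hc
          exact absurd hc.symm h
        rw [this]
        simp [pvR]
    have harr' : arr = (p ++ [x]) ++ t := by rw [harr]; simp
    have hlen : ((p ++ [x]).length : Int) = (p.length : Int) + 1 := by simp
    have := ih (p ++ [x]) (tot + (pvC2' M x p t : Int))
      (d.insert (PySem.Int.mod x M) (d.getD (PySem.Int.mod x M) 0 + 1)) harr' hd'
    rw [hlen] at this
    simp only [hslice, hinner]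
    rw [this]
    simp only [pvX]
    push_cast
    ring

lemma pvB_eq (arr : List Int) (M : Int) :
    find_trios_alt arr M = (pvC3 M arr : Int) := by
  by_cases h3 : arr.length < 3
  · rw [find_trios_alt, if_pos h3, pvC3_short M arr (by omega)]
    rfl
  · rw [find_trios_alt, if_neg h3]
    have hd : ∀ r, (PySem.Dict.empty : PySem.Dict Int Int).getD r 0 = (pvR M [] r : Int) := by
      intro r; rw [PySem.Dict.getD_empty]; rfl
    have h := pvB_main arr M arr [] 0 PySem.Dict.empty (by simp) hd
    have h0 : ((List.length ([] : List Int) : Nat) : Int) = 0 := by simp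
    rw [h0] at h
    show ((PySem.List.enumerate arr 0).foldl _ (0, PySem.Dict.empty)).1 = _
    rw [h, pvX_eq]
    simp [pvC2s]

-- ===== VERDICT (by name: the statement is the Claim_ definition above) =====
theorem find_trios_spec : Claim_equal_find_trios := by
  intro arr M _ _
  unfold Spec_find_trios
  rw [pvA_eq, pvB_eq,
    pvC3_perm M (PySem.List.sorted_perm arr (fun x => x) false)]
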